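-- pv_equiv track=rewrite | github.com/nyucel/blm2010 | final/180401065.py | xiyiToplam
-- ===== SOURCE A (Python) =====
-- def xiyiToplam(uzunluk,liste):
--     xi_yi_toplam = []
--     xi_yi_toplam.append(sum(liste))
--     for i in range(1, 7, 1):
--         deger=0
--         for j in range(uzunluk):
--             deger += (j + 1) ** i * liste[j]
--         xi_yi_toplam.append(deger)
--     return xi_yi_toplam
-- ===== SOURCE B (Python) =====
-- def xiyiToplam(uzunluk, liste):
--     total = sum(liste)
--     deger = [0] * 6
--     for j in range(uzunluk):
--         base = j + 1
--         p = base
--         x = liste[j]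
--         for i in range(6):
--             deger[i] += p * x
--             p *= base
--     return [total] + deger
-- ===== Notes on version B (the rewrite author's own statement) =====
-- stated objective: alternative
-- what changed: Replaces the seven separate passes (one sum plus six power-sum loops, each recomputing (j+1)**i from scratch) by a single pass over the list that maintains all six weighted power-sums at once with an incrementally multiplied power.
import Mathlib
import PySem

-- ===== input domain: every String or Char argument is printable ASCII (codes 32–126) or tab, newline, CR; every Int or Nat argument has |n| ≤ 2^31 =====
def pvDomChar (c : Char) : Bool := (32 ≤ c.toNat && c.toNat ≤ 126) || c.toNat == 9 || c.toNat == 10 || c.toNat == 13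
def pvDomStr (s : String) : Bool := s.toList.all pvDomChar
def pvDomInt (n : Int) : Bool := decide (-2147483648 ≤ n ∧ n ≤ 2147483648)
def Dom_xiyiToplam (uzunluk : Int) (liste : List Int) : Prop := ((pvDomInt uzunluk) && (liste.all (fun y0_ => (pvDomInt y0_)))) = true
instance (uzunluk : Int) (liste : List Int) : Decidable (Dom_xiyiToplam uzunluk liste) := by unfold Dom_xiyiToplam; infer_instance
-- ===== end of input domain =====

-- B replaces A's seven separate passes by one pass maintaining all six weighted power-sums (objective: alternative single-pass decomposition).


-- ===== PORT A =====
-- sum(liste) and liste[j]; inside Pre_ every accessed index is in range, so pyGetD's default is never used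
def xiyiToplam (uzunluk : Int) (liste : List Int) : List Int :=
  let first := liste.foldl (· + ·) 0
  (PySem.List.pyRange 1 7 1).foldl
    (fun acc i =>
      acc ++ [(PySem.List.pyRange 0 uzunluk 1).foldl
        (fun deger j => deger + (j + 1) ^ i.toNat * (PySem.List.pyGetD liste j 0)) 0])
    [first]

-- ===== PORT B =====
-- inner 'for i in range(6)' loop over the fixed-length accumulator list, with running power p
def pvAddRow (base x : Int) : Int → List Int → List Int
  | _, [] => []
  | p, d :: ds => (d + p * x) :: pvAddRow base x (p * base) ds

def xiyiToplam_alt (uzunluk : Int) (liste : List Int) : List Int :=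
  let total := liste.foldl (· + ·) 0
  let deger := (PySem.List.pyRange 0 uzunluk 1).foldl
    (fun ds j => pvAddRow (j + 1) (PySem.List.pyGetD liste j 0) (j + 1) ds)
    [0, 0, 0, 0, 0, 0]
  total :: deger

-- ===== PRECONDITION & SPEC =====
-- Pre_ excludes exactly the inputs where Python A raises IndexError (uzunluk exceeds len(liste)); both A and B raise there.
def Pre_xiyiToplam (uzunluk : Int) (liste : List Int) : Prop := uzunluk ≤ (liste.length : Int)
instance (uzunluk : Int) (liste : List Int) : Decidable (Pre_xiyiToplam uzunluk liste) := by unfold Pre_xiyiToplam; infer_instance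
def pvWitness_xiyiToplam : Int × List Int := (3, [2, -1, 4])

def Spec_xiyiToplam (uzunluk : Int) (liste : List Int) (out : List Int) : Prop := out = xiyiToplam_alt uzunluk liste
instance (uzunluk : Int) (liste : List Int) (out : List Int) : Decidable (Spec_xiyiToplam uzunluk liste out) := by unfold Spec_xiyiToplam; infer_instance

-- ===== CLAIM (what is proved, stated in full; the proofs are below) =====
def Claim_equal_xiyiToplam : Prop := ∀ (uzunluk : Int) (liste : List Int), Dom_xiyiToplam uzunluk liste → Pre_xiyiToplam uzunluk liste → Spec_xiyiToplam uzunluk liste (xiyiToplam uzunluk liste)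

-- ===== LEMMAS AND PROOFS =====
-- A's inner accumulation from an arbitrary start equals start + the map-sum
theorem pv_foldl_add (g : Int → Int) (r : List Int) (a : Int) :
    r.foldl (fun d j => d + g j) a = a + (r.map g).sum := by
  induction r generalizing a with
  | nil => simp
  | cons j r ih => simp [List.foldl, ih, add_assoc]

-- B's single pass over r, started at any six accumulators, adds the six power-sums slotwise
theorem pv_foldB (g : Int → Int) (r : List Int) (a b c d e f : Int) :
    r.foldl (fun ds j => pvAddRow (j + 1) (g j) (j + 1) ds) [a, b, c, d, e, f] =
      [a + (r.map (fun j => (j + 1) ^ 1 * g j)).sum,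
       b + (r.map (fun j => (j + 1) ^ 2 * g j)).sum,
       c + (r.map (fun j => (j + 1) ^ 3 * g j)).sum,
       d + (r.map (fun j => (j + 1) ^ 4 * g j)).sum,
       e + (r.map (fun j => (j + 1) ^ 5 * g j)).sum,
       f + (r.map (fun j => (j + 1) ^ 6 * g j)).sum] := by
  induction r generalizing a b c d e f with
  | nil => simp
  | cons j r ih =>
    simp only [List.foldl, List.map, List.sum_cons, pvAddRow, ih]
    simp only [List.cons.injEq, and_true]
    refine ⟨by ring, by ring, by ring, by ring, by ring, by ring⟩

-- ===== VERDICT (by name: the statement is the Claim_ definition above) =====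
theorem xiyiToplam_spec : Claim_equal_xiyiToplam := by
  intro u l _ _
  show xiyiToplam u l = xiyiToplam_alt u l
  have hr : PySem.List.pyRange 1 7 1 = [1, 2, 3, 4, 5, 6] := by decide
  unfold xiyiToplam xiyiToplam_alt
  rw [hr]
  simp only [List.foldl]
  simp only [Int.toNat_one, show ((2:Int).toNat = 2) from rfl, show ((3:Int).toNat = 3) from rfl, show ((4:Int).toNat = 4) from rfl, show ((5:Int).toNat = 5) from rfl, show ((6:Int).toNat = 6) from rfl]
  rw [pv_foldB (fun j => PySem.List.pyGetD l j 0) (PySem.List.pyRange 0 u 1)]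
  simp [pv_foldl_add]
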